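-- pv_equiv track=rewrite | github.com/GeneralOctopus/Reed_Solomon_Coder | GaloisField.py | carry_less_division
-- ===== SOURCE A (Python) =====
-- def bit_len(x):
--     length = 0
--     y = x
--     while y >> length:
--         length += 1
--     return length
--
-- def carry_less_division(x, y):
--     len1 = bit_len(x)
--     len2 = bit_len(y)
--
--     if len1 < len2:
--         return x
--
--     for i in range(len1 - len2, -1, -1):
--         if x & (1 << i + len2 -1):
--             x ^= y << i
--     return x
-- ===== SOURCE B (Python) =====
-- def bit_len(x):
--     length = 0
--     y = x
--     while y >> length:
--         length += 1
--     return length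
--
-- def carry_less_division(x, y):
--     len2 = bit_len(y)
--     rem = 0
--     for i in range(bit_len(x) - 1, -1, -1):
--         rem = (rem << 1) | ((x >> i) & 1)
--         if bit_len(rem) >= len2:
--             rem ^= y
--     return rem
-- ===== Notes on version B (the rewrite author's own statement) =====
-- stated objective: alternative
-- what changed: A reduces x in place by scanning the quotient positions from the top and XOR-ing shifted copies of y into x; B never modifies x: it streams x's bits MSB-to-LSB into a small LFSR-style remainder register (rem = (rem<<1)|bit, XOR y whenever the register reaches y's bit length), as in a bitwise CRC.
import Mathlib
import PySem

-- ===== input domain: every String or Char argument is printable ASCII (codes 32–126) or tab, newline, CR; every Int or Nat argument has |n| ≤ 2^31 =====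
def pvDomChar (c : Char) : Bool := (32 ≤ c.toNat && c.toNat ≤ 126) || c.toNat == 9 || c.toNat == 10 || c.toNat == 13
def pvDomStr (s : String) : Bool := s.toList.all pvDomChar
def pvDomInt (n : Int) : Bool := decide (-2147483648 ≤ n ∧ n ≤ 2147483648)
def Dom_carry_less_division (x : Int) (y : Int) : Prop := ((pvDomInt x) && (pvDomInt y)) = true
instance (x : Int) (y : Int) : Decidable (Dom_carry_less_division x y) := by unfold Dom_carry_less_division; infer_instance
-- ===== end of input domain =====

-- B replaces A's in-place schoolbook reduction of x with an MSB-first streaming (LFSR-style)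
-- remainder register; objective: alternative (different algorithm, similar cost).
-- Equivalence is claimed on Pre_ (0 ≤ x, 1 ≤ y): elsewhere Python's A never returns
-- (bit_len loops forever on negative input; y = 0 reaches '1 << -1', a ValueError).

-- ===== PORT A =====
-- Python's bit_len loop 'while y >> length: length += 1', run on x.toNat with a fuel bound
-- (x.toNat + 1 always suffices, see pvBit_len_natCast): exact for 0 ≤ x; for x < 0 the
-- Python loop never terminates (excluded by Pre_).
def bitLenGo (fuel : Nat) (n : Nat) (length : Nat) : Nat :=
  match fuel with
  | 0 => length
  | f + 1 => if n >>> length ≠ 0 then bitLenGo f n (length + 1) else length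

def bit_len (x : Int) : Nat := bitLenGo (x.toNat + 1) x.toNat 0

-- The shift counts are taken with .toNat: every i in the range and i + len2 - 1 are ≥ 0
-- whenever len2 ≥ 1; the negative shift '1 << -1' (Python: ValueError) is reached only
-- when y = 0, which Pre_ excludes.
def carry_less_division (x : Int) (y : Int) : Int :=
  let len1 := bit_len x
  let len2 := bit_len y
  if len1 < len2 then x
  else
    (PySem.List.pyRange ((len1 : Int) - (len2 : Int)) (-1) (-1)).foldl
      (fun s i =>
        if PySem.Int.band s ((1 : Int) <<< (i + (len2 : Int) - 1).toNat) ≠ 0 then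
          PySem.Int.bxor s (y <<< i.toNat)
        else s) x

-- ===== PORT B =====
def carry_less_division_alt (x : Int) (y : Int) : Int :=
  let len2 := bit_len y
  (PySem.List.pyRange ((bit_len x : Int) - 1) (-1) (-1)).foldl
    (fun rem i =>
      let r := PySem.Int.bor (rem <<< (1 : Nat)) (PySem.Int.band (x >>> i.toNat) 1)
      if len2 ≤ bit_len r then PySem.Int.bxor r y else r) 0

-- ===== PRECONDITION & SPEC =====
-- For x < 0 or y < 0 Python's bit_len never terminates, and for y = 0 A raises ValueError
-- ('1 << -1'); Pre_ admits exactly the inputs on which A returns.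
def Pre_carry_less_division (x : Int) (y : Int) : Prop := 0 ≤ x ∧ 1 ≤ y
instance (x : Int) (y : Int) : Decidable (Pre_carry_less_division x y) := by
  unfold Pre_carry_less_division; infer_instance
def pvWitness_carry_less_division : Int × Int := (13, 5)

def Spec_carry_less_division (x : Int) (y : Int) (out : Int) : Prop :=
  out = carry_less_division_alt x y
instance (x : Int) (y : Int) (out : Int) : Decidable (Spec_carry_less_division x y out) := by
  unfold Spec_carry_less_division; infer_instance

-- ===== CLAIM (what is proved, stated in full; the proofs are below) =====
def Claim_equal_carry_less_division : Prop :=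
  ∀ (x : Int) (y : Int), Dom_carry_less_division x y → Pre_carry_less_division x y →
    Spec_carry_less_division x y (carry_less_division x y)

-- ===== LEMMAS AND PROOFS =====

-- ---- generic bit lemmas ----

theorem pvTestBit_size_pred {n : ℕ} (h : n ≠ 0) : n.testBit (n.size - 1) = true := by
  have hs : 0 < n.size := Nat.size_pos.mpr (Nat.pos_of_ne_zero h)
  have h1 : 2 ^ (n.size - 1) ≤ n := Nat.lt_size.mp (by omega)
  have h2 : n < 2 ^ n.size := Nat.lt_size_self n
  have hstep : 2 ^ n.size = 2 ^ (n.size - 1) * 2 := by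
    rw [← Nat.pow_succ]; congr 1; omega
  have hd : n / 2 ^ (n.size - 1) = 1 := by
    have hlt : n / 2 ^ (n.size - 1) < 2 := by
      rw [Nat.div_lt_iff_lt_mul (by positivity)]; omega
    have hge : 1 ≤ n / 2 ^ (n.size - 1) := (Nat.le_div_iff_mul_le (by positivity)).mpr (by omega)
    omega
  rw [Nat.testBit_eq_decide_div_mod_eq, hd]
  rfl

theorem pvLt_pow_of_top_false {v s : ℕ} (h : v < 2 ^ s) (hs : 0 < s)
    (hb : v.testBit (s - 1) = false) : v < 2 ^ (s - 1) := by
  by_contra hc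
  rw [Nat.not_lt] at hc
  have hpow : 2 ^ s = 2 ^ (s - 1) * 2 := by rw [← Nat.pow_succ]; congr 1; omega
  have hd1 : v / 2 ^ (s - 1) = 1 := by
    have hlt : v / 2 ^ (s - 1) < 2 := by
      rw [Nat.div_lt_iff_lt_mul (by positivity)]; omega
    have hge : 1 ≤ v / 2 ^ (s - 1) := (Nat.le_div_iff_mul_le (by positivity)).mpr (by omega)
    omega
  rw [Nat.testBit_eq_decide_div_mod_eq, hd1] at hb
  simp at hb

theorem pvXor_same_size_lt {a b : ℕ} (ha : a ≠ 0) (hb : b ≠ 0) (h : a.size = b.size) :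
    a ^^^ b < 2 ^ (a.size - 1) := by
  have hs : 0 < a.size := Nat.size_pos.mpr (Nat.pos_of_ne_zero ha)
  have hlt : a ^^^ b < 2 ^ a.size :=
    Nat.xor_lt_two_pow (Nat.lt_size_self a) (by rw [h]; exact Nat.lt_size_self b)
  have htop : (a ^^^ b).testBit (a.size - 1) = false := by
    have t1 := pvTestBit_size_pred ha
    have t2 := pvTestBit_size_pred hb
    rw [Nat.testBit_xor, t1, h, t2]
    rfl
  exact pvLt_pow_of_top_false hlt hs htop

theorem pvAmod_red_small {y x : ℕ} (hy : 0 < y) (hle : y.size ≤ x.size) :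
    x ^^^ (y <<< (x.size - y.size)) < 2 ^ (x.size - 1) := by
  have hys : 0 < y.size := Nat.size_pos.mpr hy
  have hx0 : x ≠ 0 := by
    intro h; subst h
    rw [Nat.size_zero] at hle
    have : y.size = 0 := by omega
    rw [Nat.size_eq_zero] at this
    omega
  have hz0 : y <<< (x.size - y.size) ≠ 0 := by
    rw [Nat.shiftLeft_eq]
    positivity
  have hsz : (y <<< (x.size - y.size)).size = x.size := by
    rw [Nat.size_shiftLeft (by omega)]; omega
  exact pvXor_same_size_lt hx0 hz0 hsz.symm

theorem pvAmod_red_lt {y x : ℕ} (hy : 0 < y) (hle : y.size ≤ x.size) :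
    x ^^^ (y <<< (x.size - y.size)) < x := by
  have h1 := pvAmod_red_small hy hle
  have hys : 0 < y.size := Nat.size_pos.mpr hy
  have hx0 : x ≠ 0 := by
    intro h; subst h
    rw [Nat.size_zero] at hle
    have : y.size = 0 := by omega
    rw [Nat.size_eq_zero] at this
    omega
  have h2 : 2 ^ (x.size - 1) ≤ x := Nat.lt_size.mp (by
    have := Nat.size_pos.mpr (Nat.pos_of_ne_zero hx0); omega)
  omega

theorem pvShiftLeft_xor_small {a m c : ℕ} (hm : m < 2 ^ c) :
    (a <<< c) ^^^ m = 2 ^ c * a + m := by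
  apply Nat.eq_of_testBit_eq
  intro j
  rw [Nat.testBit_xor, Nat.testBit_shiftLeft, Nat.testBit_two_pow_mul_add a hm j]
  by_cases hj : j < c
  · simp [hj, Nat.not_le.mpr hj]
  · have : m < 2 ^ j := lt_of_lt_of_le hm (Nat.pow_le_pow_right (by norm_num) (by omega))
    simp [hj, Nat.not_lt.mp hj, Nat.testBit_lt_two_pow this]

theorem pvShiftLeft_or_small {a m c : ℕ} (hm : m < 2 ^ c) :
    (a <<< c) ||| m = 2 ^ c * a + m := by
  apply Nat.eq_of_testBit_eq
  intro j
  rw [Nat.testBit_lor, Nat.testBit_shiftLeft, Nat.testBit_two_pow_mul_add a hm j]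
  by_cases hj : j < c
  · simp [hj, Nat.not_le.mpr hj]
  · have : m < 2 ^ j := lt_of_lt_of_le hm (Nat.pow_le_pow_right (by norm_num) (by omega))
    simp [hj, Nat.not_lt.mp hj, Nat.testBit_lt_two_pow this]

theorem pvShiftLeft_xor_distrib (a b c : ℕ) :
    (a ^^^ b) <<< c = (a <<< c) ^^^ (b <<< c) := by
  apply Nat.eq_of_testBit_eq
  intro j
  rw [Nat.testBit_xor, Nat.testBit_shiftLeft, Nat.testBit_shiftLeft, Nat.testBit_shiftLeft,
    Nat.testBit_xor]
  by_cases hj : c ≤ j <;> simp [hj]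

theorem pvSize_combine {a m c : ℕ} (ha : a ≠ 0) (hm : m < 2 ^ c) :
    (2 ^ c * a + m).size = a.size + c := by
  have hs : 0 < a.size := Nat.size_pos.mpr (Nat.pos_of_ne_zero ha)
  have h1 : 2 ^ (a.size - 1) ≤ a := Nat.lt_size.mp (by omega)
  have h2 : a < 2 ^ a.size := Nat.lt_size_self a
  have hub : 2 ^ c * a + m < 2 ^ (a.size + c) := by
    have he : 2 ^ (a.size + c) = 2 ^ c * 2 ^ a.size := by rw [Nat.pow_add]; ring
    have h3 : 2 ^ c * (a + 1) = 2 ^ c * a + 2 ^ c := by ring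
    have h4 : 2 ^ c * (a + 1) ≤ 2 ^ c * 2 ^ a.size := Nat.mul_le_mul_left _ (by omega)
    omega
  have hlb : 2 ^ (a.size + c - 1) ≤ 2 ^ c * a + m := by
    have he : 2 ^ (a.size + c - 1) = 2 ^ c * 2 ^ (a.size - 1) := by
      rw [← Nat.pow_add]; congr 1; omega
    have h5 : 2 ^ c * 2 ^ (a.size - 1) ≤ 2 ^ c * a := Nat.mul_le_mul_left _ h1
    omega
  have hle : (2 ^ c * a + m).size ≤ a.size + c := Nat.size_le.mpr hub
  have hge : a.size + c - 1 < (2 ^ c * a + m).size := Nat.lt_size.mpr hlb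
  omega

theorem pvAnd_pow_ne_zero_iff (x i : ℕ) : (x &&& (1 <<< i) ≠ 0) ↔ x.testBit i = true := by
  have h1 : (1 : ℕ) <<< i = 2 ^ i := by rw [Nat.shiftLeft_eq]; ring
  have hp : 0 < 2 ^ i := by positivity
  rw [h1, Nat.and_two_pow]
  cases h : x.testBit i
  · simp
  · simp

theorem pvIntShiftLCast (m k : ℕ) : ((m : Int) <<< k) = ((m <<< k : ℕ) : Int) := by simp

theorem pvShift1Cast (k : ℕ) : ((1 : Int) <<< k) = (((1 : ℕ) <<< k : ℕ) : Int) := by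
  exact_mod_cast pvIntShiftLCast 1 k

-- ---- the common mathematical reference: schoolbook GF(2) reduction ----

def pvAmod (y : ℕ) (x : ℕ) : ℕ :=
  if h : 0 < y ∧ Nat.size y ≤ Nat.size x then
    pvAmod y (x ^^^ (y <<< (Nat.size x - Nat.size y)))
  else x
termination_by x
decreasing_by exact pvAmod_red_lt h.1 h.2

theorem pvAmod_of_small {y x : ℕ} (h : x.size < y.size) : pvAmod y x = x := by
  rw [pvAmod, dif_neg]
  omega

-- ---- Nat-level loop bodies of the two programs ----

def pvAGo (y l2 : ℕ) : ℕ → ℕ → ℕ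
  | x, 0 => x
  | x, c + 1 =>
      pvAGo y l2 (if x &&& (1 <<< (c + l2 - 1)) ≠ 0 then x ^^^ (y <<< c) else x) c

def pvBGo (x y l2 : ℕ) : ℕ → ℕ → ℕ
  | rem, 0 => rem
  | rem, c + 1 =>
      let r := (rem <<< 1) ||| ((x >>> c) &&& 1)
      pvBGo x y l2 (if l2 ≤ Nat.size r then r ^^^ y else r) c

theorem pvAGo_eq_amod {y : ℕ} (hy : 0 < y) :
    ∀ (c x : ℕ), x.size + 1 ≤ y.size + c → pvAGo y y.size x c = pvAmod y x := by
  intro c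
  induction c with
  | zero =>
      intro x hx
      rw [pvAGo, pvAmod, dif_neg]
      omega
  | succ c ih =>
      intro x hx
      have hl2 : 0 < y.size := Nat.size_pos.mpr hy
      rw [pvAGo]
      cases h : x.testBit (c + y.size - 1) with
      | false =>
          have hne : x.size ≠ y.size + c := by
            intro hsz
            have hx0 : x ≠ 0 := by
              intro h0; subst h0
              rw [Nat.size_zero] at hsz
              omega
            have ht := pvTestBit_size_pred hx0
            rw [hsz] at ht
            have hidx : y.size + c - 1 = c + y.size - 1 := by omega
            rw [hidx, h] at ht
            exact Bool.false_ne_true ht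
          rw [if_neg (by simp [pvAnd_pow_ne_zero_iff, h])]
          exact ih x (by omega)
      | true =>
          have hge : 2 ^ (c + y.size - 1) ≤ x := Nat.ge_two_pow_of_testBit h
          have hlt : c + y.size - 1 < x.size := Nat.lt_size.mpr hge
          have hsz : x.size = y.size + c := by omega
          have hc : x.size - y.size = c := by omega
          rw [if_pos (by simp [pvAnd_pow_ne_zero_iff, h])]
          have hsmall : x ^^^ (y <<< c) < 2 ^ (y.size + c - 1) := by
            have h2 := pvAmod_red_small hy (x := x) (by omega)
            rw [hc, hsz] at h2
            exact h2
          have hrec := ih (x ^^^ (y <<< c)) (by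
            have := Nat.size_le.mpr hsmall
            omega)
          rw [hrec]
          conv_rhs => rw [pvAmod]
          rw [dif_pos ⟨hy, by omega⟩, hc]

theorem pvBGo_eq_amod {x y : ℕ} (hy : 0 < y) :
    ∀ (c rem : ℕ), rem < 2 ^ (y.size - 1) →
      pvBGo x y y.size rem c = pvAmod y (2 ^ c * rem + x % 2 ^ c) := by
  intro c
  induction c with
  | zero =>
      intro rem hrem
      have hl2 : 0 < y.size := Nat.size_pos.mpr hy
      rw [pvBGo]
      simp only [pow_zero, one_mul, Nat.mod_one, Nat.add_zero]
      rw [pvAmod_of_small]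
      have := Nat.size_le.mpr hrem
      omega
  | succ c ih =>
      intro rem hrem
      have hl2 : 0 < y.size := Nat.size_pos.mpr hy
      rw [pvBGo]
      set b := (x >>> c) &&& 1 with hb
      have hbmod : b = x / 2 ^ c % 2 := by
        rw [hb, Nat.and_one_is_mod, Nat.shiftRight_eq_div_pow]
      have hb2 : b < 2 := by omega
      have hr : (rem <<< 1) ||| b = 2 * rem + b := by
        have h1 := pvShiftLeft_or_small (a := rem) (c := 1) (m := b) (by omega)
        simpa [Nat.mul_comm] using h1
      have hrlt : 2 * rem + b < 2 ^ y.size := by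
        have hstep : 2 ^ y.size = 2 * 2 ^ (y.size - 1) := by
          conv_lhs => rw [show y.size = (y.size - 1) + 1 by omega]
          rw [Nat.pow_succ']
        omega
      have hsplit : x % 2 ^ (c + 1) = 2 ^ c * (x / 2 ^ c % 2) + x % 2 ^ c := by
        rw [Nat.mod_pow_succ]
        ring
      have harg : 2 ^ (c + 1) * rem + x % 2 ^ (c + 1)
          = 2 ^ c * (2 * rem + b) + x % 2 ^ c := by
        rw [hsplit, ← hbmod, pow_succ]
        ring
      have hm : x % 2 ^ c < 2 ^ c := Nat.mod_lt _ (by positivity)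
      by_cases hcond : y.size ≤ Nat.size ((rem <<< 1) ||| b)
      · -- reduction step
        have hrsz : (2 * rem + b).size = y.size := by
          have hle := Nat.size_le.mpr hrlt
          rw [hr] at hcond
          omega
        have hr0 : (2 * rem + b) ≠ 0 := by
          intro h0
          rw [h0, Nat.size_zero] at hrsz
          omega
        have hy0 : y ≠ 0 := by omega
        have hxor_small : (2 * rem + b) ^^^ y < 2 ^ (y.size - 1) := by
          have h6 := pvXor_same_size_lt hr0 hy0 (by rw [hrsz])
          rw [hrsz] at h6
          exact h6
        rw [if_pos hcond, hr, ih _ hxor_small, harg]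
        have hV : 2 ^ c * (2 * rem + b) + x % 2 ^ c = ((2 * rem + b) <<< c) ^^^ (x % 2 ^ c) :=
          (pvShiftLeft_xor_small hm).symm
        have hVsz : (2 ^ c * (2 * rem + b) + x % 2 ^ c).size = y.size + c := by
          rw [pvSize_combine hr0 hm, hrsz]
        conv_rhs => rw [pvAmod]
        rw [dif_pos ⟨hy, by rw [hVsz]; omega⟩]
        congr 1
        rw [hVsz]
        have hc2 : y.size + c - y.size = c := by omega
        rw [hc2]
        symm
        rw [hV, Nat.xor_assoc, Nat.xor_comm (x % 2 ^ c) (y <<< c), ← Nat.xor_assoc,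
          ← pvShiftLeft_xor_distrib, pvShiftLeft_xor_small hm]
      · -- no reduction
        have hsmall : 2 * rem + b < 2 ^ (y.size - 1) := by
          rw [hr] at hcond
          have h7 : (2 * rem + b).size ≤ y.size - 1 := by omega
          have := Nat.size_le.mp h7
          omega
        rw [if_neg hcond, hr, ih _ hsmall, harg]

-- ---- bit_len agrees with Nat.size ----

theorem pvBitLenGo_eq (n : ℕ) :
    ∀ (fuel l : ℕ), n.size ≤ l + fuel → bitLenGo fuel n l = max l n.size := by
  intro fuel
  induction fuel with
  | zero =>
      intro l hl
      rw [bitLenGo]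
      omega
  | succ f ih =>
      intro l hl
      rw [bitLenGo]
      by_cases h : l < n.size
      · rw [if_pos]
        · rw [ih (l + 1) (by omega)]
          omega
        · have h2 : 2 ^ l ≤ n := Nat.lt_size.mp h
          rw [Nat.shiftRight_eq_div_pow]
          have h3 : 1 ≤ n / 2 ^ l := (Nat.le_div_iff_mul_le (by positivity : 0 < 2 ^ l)).mpr (by omega)
          omega
      · rw [if_neg]
        · omega
        · have h2 : n < 2 ^ l := Nat.size_le.mp (by omega)
          rw [Nat.shiftRight_eq_div_pow]
          simp
          omega

theorem pvBit_len_natCast (n : ℕ) : bit_len (n : Int) = n.size := by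
  rw [bit_len, Int.toNat_natCast, pvBitLenGo_eq]
  · omega
  · have h1 : n < 2 ^ n := Nat.lt_two_pow_self
    have h2 : n.size ≤ n := Nat.size_le.mpr (by
      calc n < 2 ^ n := h1
        _ ≤ 2 ^ n := le_refl _)
    omega

-- ---- fold bridges: the Int ports compute the Nat loops ----

theorem pvFoldA (y l2 : ℕ) (hl2 : 1 ≤ l2) :
    ∀ (c x : ℕ),
      (PySem.List.pyRange ((c : Int) - 1) (-1) (-1)).foldl
        (fun s i =>
          if PySem.Int.band s ((1 : Int) <<< (i + (l2 : Int) - 1).toNat) ≠ 0 then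
            PySem.Int.bxor s ((y : Int) <<< i.toNat)
          else s) (x : Int)
      = ((pvAGo y l2 x c : ℕ) : Int) := by
  intro c
  induction c with
  | zero =>
      intro x
      rw [PySem.List.pyRange_neg_one_eq_nil (by norm_num), List.foldl_nil, pvAGo]
  | succ c ih =>
      intro x
      rw [show ((c + 1 : ℕ) : Int) - 1 = (c : Int) by push_cast; ring,
        PySem.List.pyRange_neg_one_cons (by omega : (-1 : Int) < (c : Int)), List.foldl_cons]
      have hidx : ((c : Int) + (l2 : Int) - 1).toNat = c + l2 - 1 := by omega
      have hbody : (if PySem.Int.band (x : Int) ((1 : Int) <<< ((c : Int) + (l2 : Int) - 1).toNat) ≠ 0 then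
            PySem.Int.bxor (x : Int) ((y : Int) <<< ((c : Int)).toNat)
          else (x : Int))
          = (((if x &&& (1 <<< (c + l2 - 1)) ≠ 0 then x ^^^ (y <<< c) else x) : ℕ) : Int) := by
        rw [hidx, Int.toNat_natCast, pvShift1Cast, PySem.Int.band_natCast]
        by_cases h : x &&& (1 <<< (c + l2 - 1)) = 0
        · simp [h]
        · rw [if_pos (by exact_mod_cast h), if_pos h, pvIntShiftLCast, PySem.Int.bxor_natCast]
      rw [hbody, ih]
      simp [pvAGo]

theorem pvIntShiftRCastI (m k : ℕ) :
    ((m : Int) >>> ((k : ℕ) : Int)) = ((m >>> k : ℕ) : Int) := by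
  simp

theorem pvFoldB (x y l2 : ℕ) :
    ∀ (c rem : ℕ),
      (PySem.List.pyRange ((c : Int) - 1) (-1) (-1)).foldl
        (fun (s : Int) (i : Int) =>
          if l2 ≤ bit_len (PySem.Int.bor (s <<< (1 : Nat)) (PySem.Int.band ((x : Int) >>> ((i.toNat : ℕ) : Int)) 1)) then
            PySem.Int.bxor (PySem.Int.bor (s <<< (1 : Nat)) (PySem.Int.band ((x : Int) >>> ((i.toNat : ℕ) : Int)) 1)) (y : Int)
          else PySem.Int.bor (s <<< (1 : Nat)) (PySem.Int.band ((x : Int) >>> ((i.toNat : ℕ) : Int)) 1)) (rem : Int)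
      = ((pvBGo x y l2 rem c : ℕ) : Int) := by
  intro c
  induction c with
  | zero =>
      intro rem
      rw [PySem.List.pyRange_neg_one_eq_nil (by norm_num), List.foldl_nil, pvBGo]
  | succ c ih =>
      intro rem
      rw [show ((c + 1 : ℕ) : Int) - 1 = (c : Int) by push_cast; ring,
        PySem.List.pyRange_neg_one_cons (by omega : (-1 : Int) < (c : Int)), List.foldl_cons]
      have hrcast : PySem.Int.bor ((rem : Int) <<< (1 : Nat)) (PySem.Int.band ((x : Int) >>> ((((c : Int)).toNat : ℕ) : Int)) 1)
          = (((rem <<< 1) ||| ((x >>> c) &&& 1) : ℕ) : Int) := by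
        rw [Int.toNat_natCast, pvIntShiftLCast, pvIntShiftRCastI,
          show (1 : Int) = ((1 : ℕ) : Int) from rfl, PySem.Int.band_natCast, PySem.Int.bor_natCast]
      rw [hrcast]
      simp only [pvBit_len_natCast]
      by_cases h : l2 ≤ Nat.size ((rem <<< 1) ||| ((x >>> c) &&& 1))
      · rw [if_pos h, PySem.Int.bxor_natCast, ih]
        simp only [pvBGo]
        rw [if_pos h]
      · rw [if_neg h, ih]
        simp only [pvBGo]
        rw [if_neg h]

-- ===== VERDICT (by name: the statement is the Claim_ definition above) =====
theorem carry_less_division_spec : Claim_equal_carry_less_division := by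
  unfold Claim_equal_carry_less_division
  intro x y _ hpre
  obtain ⟨hx, hy⟩ := hpre
  unfold Spec_carry_less_division
  obtain ⟨X, rfl⟩ : ∃ X : ℕ, x = (X : Int) := ⟨x.toNat, (Int.toNat_of_nonneg hx).symm⟩
  obtain ⟨Y, rfl⟩ : ∃ Y : ℕ, y = (Y : Int) := ⟨y.toNat, (Int.toNat_of_nonneg (by omega)).symm⟩
  have hY : 0 < Y := by exact_mod_cast hy
  have hl2 : 1 ≤ Nat.size Y := Nat.size_pos.mpr hY
  simp only [carry_less_division, carry_less_division_alt, pvBit_len_natCast]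
  -- B side
  have hB : (PySem.List.pyRange ((Nat.size X : Int) - 1) (-1) (-1)).foldl
      (fun (s : Int) (i : Int) =>
        if Nat.size Y ≤ bit_len (PySem.Int.bor (s <<< (1 : Nat)) (PySem.Int.band ((X : Int) >>> ((i.toNat : ℕ) : Int)) 1)) then
          PySem.Int.bxor (PySem.Int.bor (s <<< (1 : Nat)) (PySem.Int.band ((X : Int) >>> ((i.toNat : ℕ) : Int)) 1)) (Y : Int)
        else PySem.Int.bor (s <<< (1 : Nat)) (PySem.Int.band ((X : Int) >>> ((i.toNat : ℕ) : Int)) 1)) 0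
      = ((pvAmod Y X : ℕ) : Int) := by
    rw [show (0 : Int) = ((0 : ℕ) : Int) from rfl, pvFoldB X Y (Nat.size Y) (Nat.size X) 0,
      pvBGo_eq_amod hY (Nat.size X) 0 (by positivity)]
    congr 2
    have := Nat.lt_size_self X
    simp [Nat.mod_eq_of_lt this]
  rw [hB]
  by_cases hcase : Nat.size X < Nat.size Y
  · rw [if_pos hcase, pvAmod_of_small hcase]
  · rw [if_neg hcase]
    rw [Nat.not_lt] at hcase
    rw [show ((Nat.size X : Int) - (Nat.size Y : Int)) = ((Nat.size X - Nat.size Y + 1 : ℕ) : Int) - 1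
        by omega]
    rw [pvFoldA Y (Nat.size Y) hl2 (Nat.size X - Nat.size Y + 1) X,
      pvAGo_eq_amod hY (Nat.size X - Nat.size Y + 1) X (by omega)]
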